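-- pv_equiv track=rewrite | github.com/yeek1ATWIT/Spider_Crawler | queryURLs.py | combine_dict_elements2
-- ===== SOURCE A (Python) =====
-- def contains_all_words(text1, text2):
--     """Check if all words in text2 are present in text1."""
--     words1 = set(text1.split())
--     words2 = set(text2.split())
--     return words2.issubset(words1)
--
-- def combine_dict_elements2(param_dict):
--     keys = list(param_dict.keys())
--     combined_dict = {}
--     i = 0
--
--     while i < len(keys):
--         current_key = keys[i]
--         current_indent, current_count = param_dict[current_key]
--
--         if current_indent == 1:
--             combined_key = current_key
--             combined_count = current_count
--
--             j = i + 1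
--             while j < len(keys):
--                 next_key = keys[j]
--                 next_indent, next_count = param_dict[next_key]
--
--                 if next_indent > 1:
--                     if not contains_all_words(combined_key, next_key):
--                         combined_key += f"\n{next_key}"
--                         combined_count += next_count
--                     j += 1
--                 else:
--                     break
--
--             combined_dict[combined_key] = (current_indent, combined_count)
--             i = j
--         else:
--             combined_dict[current_key] = (current_indent, current_count)
--             i += 1
--
--     return combined_dict
-- ===== SOURCE B (Python) =====
-- def contains_all_words(text1, text2):
--     """Check if all words in text2 are present in text1."""
--     words1 = set(text1.split())
--     words2 = set(text2.split())
--     return words2.issubset(words1)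
--
-- def combine_dict_elements2(param_dict):
--     # Single linear pass with an explicit active-block state instead of
--     # an index-driven outer loop with a nested inner while.
--     result = {}
--     active = False
--     block_key = None
--     block_count = 0
--     for key, (indent, count) in param_dict.items():
--         if indent == 1:
--             if active:
--                 result[block_key] = (1, block_count)
--             active = True
--             block_key, block_count = key, count
--         elif indent > 1 and active:
--             if not contains_all_words(block_key, key):
--                 block_key += f"\n{key}"
--                 block_count += count
--         else:
--             if active:
--                 result[block_key] = (1, block_count)
--                 active = False
--             result[key] = (indent, count)
--     if active:
--         result[block_key] = (1, block_count)
--     return result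
-- ===== Notes on version B (the rewrite author's own statement) =====
-- stated objective: simpler
-- what changed: Replaces the index-driven outer while with a nested inner while (i/j juggling) by one linear for-pass over the items that carries an explicit active-block state (block_key, block_count, active) and flushes the pending block exactly where A inserts it.
import Mathlib
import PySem

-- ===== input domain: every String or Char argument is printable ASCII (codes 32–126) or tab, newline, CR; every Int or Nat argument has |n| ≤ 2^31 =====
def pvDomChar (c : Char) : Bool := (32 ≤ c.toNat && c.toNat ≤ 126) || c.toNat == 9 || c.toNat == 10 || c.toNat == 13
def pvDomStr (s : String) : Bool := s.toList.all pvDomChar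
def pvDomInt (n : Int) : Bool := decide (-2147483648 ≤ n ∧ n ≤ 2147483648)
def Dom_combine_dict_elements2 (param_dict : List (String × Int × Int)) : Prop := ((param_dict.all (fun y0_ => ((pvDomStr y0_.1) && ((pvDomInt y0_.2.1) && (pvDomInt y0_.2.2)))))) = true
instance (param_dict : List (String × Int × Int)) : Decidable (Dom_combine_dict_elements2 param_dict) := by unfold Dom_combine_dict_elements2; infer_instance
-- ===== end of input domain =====

-- B replaces A's index-driven outer/inner while pair by one linear pass with an
-- explicit active-block state (objective: simpler decomposition, same cost).

-- ===== PORT A =====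
-- contains_all_words: shared helper of both Pythons, ported once
def pvContainsAllWords (text1 text2 : String) : Bool :=
  PySem.Set.issubset (PySem.Set.ofList (PySem.Str.split₀ text2))
    (PySem.Set.ofList (PySem.Str.split₀ text1))

-- A's inner while over j: consumes keys while indent > 1, returns the merged
-- key/count and the remaining keys (keys[j:]).  param_dict[k] is getD with an
-- unreachable default: k always comes from the dict's own key list.
def pvInnerA (pd : PySem.Dict String (Int × Int)) :
    List String → String → Int → String × Int × List String
  | [], ck, cc => (ck, cc, [])
  | k :: rest, ck, cc =>
    let v := pd.getD k (0, 0)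
    if v.1 > 1 then
      if !(pvContainsAllWords ck k) then
        pvInnerA pd rest (ck ++ "\n" ++ k) (cc + v.2)
      else
        pvInnerA pd rest ck cc
    else (ck, cc, k :: rest)

-- termination measure for the outer loop: the inner loop returns a suffix
theorem pvInnerA_len (pd : PySem.Dict String (Int × Int)) :
    ∀ (l : List String) (ck : String) (cc : Int),
      (pvInnerA pd l ck cc).2.2.length ≤ l.length := by
  intro l
  induction l with
  | nil => intro ck cc; simp [pvInnerA]
  | cons k rest ih =>
    intro ck cc
    simp only [pvInnerA]
    split
    · split
      · exact Nat.le_succ_of_le (ih _ _)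
      · exact Nat.le_succ_of_le (ih _ _)
    · simp

-- A's outer while over i: position in the key list + combined_dict accumulator
def pvLoopA (pd : PySem.Dict String (Int × Int)) :
    List String → PySem.Dict String (Int × Int) → PySem.Dict String (Int × Int)
  | [], acc => acc
  | k :: rest, acc =>
    let v := pd.getD k (0, 0)
    if v.1 = 1 then
      let r := pvInnerA pd rest k v.2
      pvLoopA pd r.2.2 (acc.insert r.1 (v.1, r.2.1))
    else
      pvLoopA pd rest (acc.insert k v)
termination_by l _ => l.length
decreasing_by
  · exact Nat.lt_succ_of_le (pvInnerA_len pd rest k v.2)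
  · exact Nat.lt_succ_self _

def combine_dict_elements2 (param_dict : List (String × Int × Int)) : List (String × Int × Int) :=
  let d : PySem.Dict String (Int × Int) := PySem.Dict.mk param_dict
  (pvLoopA d d.keys PySem.Dict.empty).items

-- ===== PORT B =====
-- flush: emit the active block (if any) into the result dict
def pvFlush (res : PySem.Dict String (Int × Int)) (act : Option (String × Int)) :
    PySem.Dict String (Int × Int) :=
  match act with
  | some (ck, cc) => res.insert ck (1, cc)
  | none => res

-- one step of B's single pass (state: result dict × active block)
def pvStepB (st : PySem.Dict String (Int × Int) × Option (String × Int))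
    (kv : String × Int × Int) : PySem.Dict String (Int × Int) × Option (String × Int) :=
  let (res, act) := st
  let (k, ind, cnt) := kv
  if ind = 1 then
    (pvFlush res act, some (k, cnt))
  else
    match act with
    | some (ck, cc) =>
      if ind > 1 then
        if !(pvContainsAllWords ck k) then (res, some (ck ++ "\n" ++ k, cc + cnt))
        else (res, some (ck, cc))
      else ((res.insert ck (1, cc)).insert k (ind, cnt), none)
    | none => (res.insert k (ind, cnt), none)

def combine_dict_elements2_alt (param_dict : List (String × Int × Int)) : List (String × Int × Int) :=
  let st := param_dict.foldl pvStepB (PySem.Dict.empty, none)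
  (pvFlush st.1 st.2).items

-- ===== PRECONDITION & SPEC =====
-- Pre_ excludes association lists with duplicate keys: those do not represent a
-- Python dict (dict construction collapses them before A ever runs).
def Pre_combine_dict_elements2 (param_dict : List (String × Int × Int)) : Prop :=
  (param_dict.map Prod.fst).Nodup
instance (param_dict : List (String × Int × Int)) : Decidable (Pre_combine_dict_elements2 param_dict) := by unfold Pre_combine_dict_elements2; infer_instance
def pvWitness_combine_dict_elements2 : (List (String × Int × Int)) :=
  [("a b", 1, 2), ("b", 2, 3), ("c d", 2, 1), ("e", 0, 4)]

def Spec_combine_dict_elements2 (param_dict : List (String × Int × Int)) (out : List (String × Int × Int)) : Prop := out = combine_dict_elements2_alt param_dict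
instance (param_dict : List (String × Int × Int)) (out : List (String × Int × Int)) : Decidable (Spec_combine_dict_elements2 param_dict out) := by unfold Spec_combine_dict_elements2; infer_instance

-- ===== CLAIM (what is proved, stated in full; the proofs are below) =====
def Claim_equal_combine_dict_elements2 : Prop := ∀ (param_dict : List (String × Int × Int)), Dom_combine_dict_elements2 param_dict → Pre_combine_dict_elements2 param_dict → Spec_combine_dict_elements2 param_dict (combine_dict_elements2 param_dict)

-- ===== LEMMAS AND PROOFS =====

-- Main loop correspondence: over any item list l whose keys look up in pd to
-- their own values, A's outer loop (part 1) and A's inner loop continuation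
-- (part 2) equal B's fold with no / an active block respectively.
theorem pvMain (pd : PySem.Dict String (Int × Int)) :
    ∀ (l : List (String × Int × Int)),
      (∀ p ∈ l, pd.getD p.1 (0, 0) = p.2) →
      (∀ acc, pvLoopA pd (l.map Prod.fst) acc =
        (let st := l.foldl pvStepB (acc, none); pvFlush st.1 st.2)) ∧
      (∀ acc ck cc,
        (let r := pvInnerA pd (l.map Prod.fst) ck cc;
         pvLoopA pd r.2.2 (acc.insert r.1 (1, r.2.1))) =
        (let st := l.foldl pvStepB (acc, some (ck, cc)); pvFlush st.1 st.2)) := by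
  intro l
  induction l with
  | nil =>
    intro _
    constructor
    · intro acc; simp [pvLoopA, pvFlush]
    · intro acc ck cc; simp [pvInnerA, pvLoopA, pvFlush]
  | cons p rest ih =>
    intro h
    obtain ⟨k, ind, cnt⟩ := p
    have hk : pd.getD k (0, 0) = (ind, cnt) := h (k, ind, cnt) (by simp)
    have hrest : ∀ p ∈ rest, pd.getD p.1 (0, 0) = p.2 := fun p hp => h p (by simp [hp])
    obtain ⟨ih1, ih2⟩ := ih hrest
    constructor
    · intro acc
      by_cases h1 : ind = 1
      · -- start a new block
        simp only [List.map_cons, pvLoopA, hk, h1, List.foldl_cons, pvStepB, pvFlush]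
        exact ih2 acc k cnt
      · -- copy the entry
        simp only [List.map_cons, pvLoopA, hk, List.foldl_cons, pvStepB,
          if_neg h1, pvFlush]
        exact ih1 (acc.insert k (ind, cnt))
    · intro acc ck cc
      by_cases h2 : ind > 1
      · -- merge or skip, block stays active
        have h1 : ¬ ind = 1 := by omega
        simp only [List.map_cons, pvInnerA, hk, List.foldl_cons, pvStepB,
          if_neg h1, if_pos h2]
        by_cases hw : pvContainsAllWords ck k
        · simpa [hw] using ih2 acc ck cc
        · simpa [hw] using ih2 acc (ck ++ "\n" ++ k) (cc + cnt)
      · -- block ends here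
        simp only [List.map_cons, pvInnerA, hk, if_neg h2]
        by_cases h1 : ind = 1
        · -- a new block starts immediately
          simp only [pvLoopA, hk, h1, List.foldl_cons, pvStepB, pvFlush]
          exact ih2 (acc.insert ck (1, cc)) k cnt
        · -- flush then copy
          simp only [pvLoopA, hk, List.foldl_cons, pvStepB, if_neg h1, if_neg h2, pvFlush]
          exact ih1 ((acc.insert ck (1, cc)).insert k (ind, cnt))

-- ===== VERDICT (by name: the statement is the Claim_ definition above) =====
theorem combine_dict_elements2_spec : Claim_equal_combine_dict_elements2 := by
  intro pd _ hpre
  unfold Spec_combine_dict_elements2 combine_dict_elements2 combine_dict_elements2_alt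
  have hlook : ∀ p ∈ pd, (PySem.Dict.mk pd).getD p.1 (0, 0) = p.2 := by
    intro p hp
    obtain ⟨k, v⟩ := p
    exact PySem.Dict.getD_of_mem_items (d := PySem.Dict.mk pd) hp hpre (0, 0)
  have hkeys : (PySem.Dict.mk pd).keys = pd.map Prod.fst := rfl
  simp only [hkeys, (pvMain (PySem.Dict.mk pd) pd hlook).1 PySem.Dict.empty]
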